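-- pv_equiv track=rewrite | github.com/volneygs/Hackerrank | nestedLists.py | nestedLists
-- ===== SOURCE A (Python) =====
-- def nestedLists(num, names, grades):
--
--     lowest = grades[0]
--     secondLowest = grades[0]
--
--     lowestList = []
--
--     for i in range(len(names)):
--         if(grades[i] < lowest):
--             lowest = grades[i]
--
--     for j in range(len(names)):
--         if(grades[j] != lowest):
--             secondLowest = grades[j]
--
--     for k in range(len(names)):
--         if(grades[k] <= secondLowest and grades[k] > lowest):
--             secondLowest = grades[k]
--
--     for p in range(len(names)):
--         if(grades[p] == secondLowest):
--             lowestList.append(names[p])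
--
--
--     return lowestList
-- ===== SOURCE B (Python) =====
-- def nestedLists(num, names, grades):
--     if not names:
--         return []
--     distinct = sorted(set(grades[:len(names)]))
--     second = distinct[1] if len(distinct) > 1 else distinct[0]
--     return [name for name, grade in zip(names, grades) if grade == second]
-- ===== Notes on version B (the rewrite author's own statement) =====
-- stated objective: simpler
-- what changed: Replaced A's four index-loop scans (running min, last-differing element, bounded re-min, collect) with: sort the distinct grades of the names-length prefix, take the second entry (or the only one), and collect matching names with one zip comprehension; Pre_ excludes exactly the inputs where A raises IndexError (empty grades, or names longer than grades).
import Mathlib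
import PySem

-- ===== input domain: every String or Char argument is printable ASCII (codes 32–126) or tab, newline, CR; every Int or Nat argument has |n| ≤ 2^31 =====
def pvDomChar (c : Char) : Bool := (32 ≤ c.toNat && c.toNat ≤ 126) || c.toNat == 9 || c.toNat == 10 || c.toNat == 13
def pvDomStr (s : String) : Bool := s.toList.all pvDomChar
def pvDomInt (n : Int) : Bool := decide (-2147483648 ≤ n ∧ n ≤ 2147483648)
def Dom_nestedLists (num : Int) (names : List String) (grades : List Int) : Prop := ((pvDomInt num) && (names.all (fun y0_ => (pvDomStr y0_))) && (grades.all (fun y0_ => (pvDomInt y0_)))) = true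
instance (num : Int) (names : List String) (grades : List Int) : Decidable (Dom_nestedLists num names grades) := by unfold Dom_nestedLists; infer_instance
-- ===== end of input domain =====

-- B replaces A's four index scans with one sort of the distinct grades (pick the second
-- entry) and a zip comprehension: simpler, same values on all inputs where A returns.


-- ===== PORT A =====
def nestedLists (num : Int) (names : List String) (grades : List Int) : List String :=
  let lowest0 := PySem.List.pyGetD grades 0 0        -- grades[0]; in range under Pre_
  let n : Int := names.length
  let lowest := (PySem.List.pyRange 0 n 1).foldl
    (fun l i => if PySem.List.pyGetD grades i 0 < l then PySem.List.pyGetD grades i 0 else l)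
    lowest0
  let secondLowest1 := (PySem.List.pyRange 0 n 1).foldl
    (fun s j => if PySem.List.pyGetD grades j 0 ≠ lowest then PySem.List.pyGetD grades j 0 else s)
    lowest0
  let secondLowest := (PySem.List.pyRange 0 n 1).foldl
    (fun s k => if PySem.List.pyGetD grades k 0 ≤ s ∧ PySem.List.pyGetD grades k 0 > lowest
                then PySem.List.pyGetD grades k 0 else s)
    secondLowest1
  (PySem.List.pyRange 0 n 1).foldl
    (fun acc p => if PySem.List.pyGetD grades p 0 = secondLowest
                  then acc ++ [PySem.List.pyGetD names p ""] else acc)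
    []

-- ===== PORT B =====
def nestedLists_alt (num : Int) (names : List String) (grades : List Int) : List String :=
  if names = [] then []
  else
    let distinct := PySem.List.sorted
      (PySem.Set.ofList (PySem.List.slice grades none (some (names.length : Int))))
      (fun x => x) false
    let second := if 1 < distinct.length then PySem.List.pyGetD distinct 1 0
                  else PySem.List.pyGetD distinct 0 0
    (names.zip grades).filterMap (fun p => if p.2 = second then some p.1 else none)

-- ===== PRECONDITION & SPEC =====
-- Pre_ excludes exactly the inputs where the Python A raises IndexError:
-- empty grades (grades[0]) or names longer than grades (grades[i], i < len(names)).
def Pre_nestedLists (num : Int) (names : List String) (grades : List Int) : Prop :=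
  grades ≠ [] ∧ names.length ≤ grades.length
instance (num : Int) (names : List String) (grades : List Int) : Decidable (Pre_nestedLists num names grades) := by unfold Pre_nestedLists; infer_instance

def pvWitness_nestedLists : Int × List String × List Int := (4, ["ann", "bob", "cyd", "dee"], [3, 1, 3, 2])

def Spec_nestedLists (num : Int) (names : List String) (grades : List Int) (out : List String) : Prop := out = nestedLists_alt num names grades
instance (num : Int) (names : List String) (grades : List Int) (out : List String) : Decidable (Spec_nestedLists num names grades out) := by unfold Spec_nestedLists; infer_instance

-- ===== CLAIM (what is proved, stated in full; the proofs are below) =====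
def Claim_equal_nestedLists : Prop := ∀ (num : Int) (names : List String) (grades : List Int), Dom_nestedLists num names grades → Pre_nestedLists num names grades → Spec_nestedLists num names grades (nestedLists num names grades)

-- ===== LEMMAS AND PROOFS =====

-- a 'for i in range(n): ... xs[i] ...' fold, with n <= len xs, is a fold over the prefix xs[:n]
theorem foldl_range_getD {b : Type} (xs : List Int) (n : Nat) (h : n ≤ xs.length)
    (f : b → Int → b) (init : b) :
    (PySem.List.pyRange 0 (n : Int) 1).foldl (fun acc i => f acc (PySem.List.pyGetD xs i 0)) init
      = (xs.take n).foldl f init := by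
  have hlen : (xs.take n).length = n := by simp [h]
  have hmain := PySem.List.foldl_pyRange_zero_pyGetD (xs.take n) 0 f init
  rw [PySem.List.len_eq, hlen] at hmain
  rw [← hmain]
  apply PySem.List.foldl_congr_mem
  intro acc i hi
  rw [PySem.List.mem_pyRange_one] at hi
  have h1 : i < (xs.length : Int) := by omega
  have h2 : i < ((xs.take n).length : Int) := by rw [hlen]; omega
  rw [PySem.List.pyGetD_eq_getElem xs 0 hi.1 h1, PySem.List.pyGetD_eq_getElem (xs.take n) 0 hi.1 h2]
  simp [List.getElem_take]

-- A's first loop is a running minimum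
theorem foldl_if_lt_eq_min (l : List Int) (a : Int) :
    l.foldl (fun s x => if x < s then x else s) a = l.foldl min a := by
  apply PySem.List.foldl_congr_mem
  intro acc x _
  rw [min_def]
  split_ifs <;> omega

-- A's second loop: the last element differing from lo, or the init if none differs
theorem foldl_last_ne (l : List Int) (lo : Int) (a : Int) :
    (l.foldl (fun s x => if x ≠ lo then x else s) a = a ∧ ∀ x ∈ l, x = lo)
    ∨ (l.foldl (fun s x => if x ≠ lo then x else s) a ∈ l
       ∧ l.foldl (fun s x => if x ≠ lo then x else s) a ≠ lo) := by
  induction l generalizing a with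
  | nil => left; simp
  | cons y t ih =>
    simp only [List.foldl_cons]
    by_cases hy : y = lo
    · simp only [hy, ne_eq, not_true_eq_false, if_false]
      rcases ih a with ⟨h1, h2⟩ | ⟨h1, h2⟩
      · left
        refine ⟨h1, ?_⟩
        intro x hx
        rcases List.mem_cons.mp hx with h | h
        · rw [h]
        · exact h2 x h
      · right; exact ⟨List.mem_cons_of_mem _ h1, h2⟩
    · simp only [ne_eq, hy, not_false_eq_true, if_true]
      rcases ih y with ⟨h1, h2⟩ | ⟨h1, h2⟩
      · right
        rw [h1]
        exact ⟨List.mem_cons_self, hy⟩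
      · right; exact ⟨List.mem_cons_of_mem _ h1, h2⟩

-- A's third loop, when lo bounds l below, is a running minimum over the elements above lo
theorem foldl_between (l : List Int) (lo : Int) (v : Int) (hl : ∀ x ∈ l, lo ≤ x) :
    l.foldl (fun s x => if x ≤ s ∧ x > lo then x else s) v
      = (l.filter (fun x => decide (lo < x))).foldl min v := by
  induction l generalizing v with
  | nil => simp
  | cons y t ih =>
    have hy := hl y List.mem_cons_self
    have ht : ∀ x ∈ t, lo ≤ x := fun x hx => hl x (List.mem_cons_of_mem _ hx)
    by_cases h : lo < y
    · have hstep : (if y ≤ v ∧ y > lo then y else v) = min v y := by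
        by_cases hyv : y ≤ v
        · rw [if_pos ⟨hyv, h⟩, min_eq_right hyv]
        · rw [if_neg (fun hc => hyv hc.1), min_eq_left (by omega)]
      rw [List.foldl_cons, hstep, List.filter_cons_of_pos (by simpa using h), List.foldl_cons]
      exact ih (min v y) ht
    · have hcond : ¬ (y ≤ v ∧ y > lo) := by omega
      rw [List.foldl_cons, if_neg hcond, List.filter_cons_of_neg (by simpa using h)]
      exact ih v ht

-- an append-if accumulator loop is a filterMap
theorem foldl_ifapp_eq_filterMap {a b : Type} (l : List a) (Q : a → Prop) [DecidablePred Q]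
    (f : a → b) (acc : List b) :
    l.foldl (fun acc x => if Q x then acc ++ [f x] else acc) acc
      = acc ++ l.filterMap (fun x => if Q x then some (f x) else none) := by
  induction l generalizing acc with
  | nil => simp
  | cons y t ih =>
    by_cases hy : Q y <;> simp [hy, ih]

-- A's indexed collect loop over range(len(names)) is B's filterMap over the zip
theorem filterMap_range_zip (S : Int) (as : List String) (bs : List Int)
    (h : as.length ≤ bs.length) :
    (List.range as.length).filterMap
      (fun (k : Nat) => if PySem.List.pyGetD bs (k : Int) 0 = S
                then some (PySem.List.pyGetD as (k : Int) "") else none)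
      = (as.zip bs).filterMap (fun p => if p.2 = S then some p.1 else none) := by
  induction as generalizing bs with
  | nil => simp
  | cons nm nt ih =>
    cases bs with
    | nil => simp at h
    | cons b bt =>
      rw [List.length_cons, List.range_succ_eq_map, List.filterMap_cons, List.filterMap_map]
      have hstep : ∀ k : Nat,
          ((fun k : Nat => if PySem.List.pyGetD (b :: bt) (k : Int) 0 = S
              then some (PySem.List.pyGetD (nm :: nt) (k : Int) "") else none) ∘ (· + 1)) k
          = (fun k : Nat => if PySem.List.pyGetD bt (k : Int) 0 = S
              then some (PySem.List.pyGetD nt (k : Int) "") else none) k := by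
        intro k
        have hcast : ((k + 1 : Nat) : Int) = (k : Int) + 1 := by push_cast; ring
        have hb : PySem.List.pyGetD (b :: bt) ((k + 1 : Nat) : Int) 0
            = PySem.List.pyGetD bt (k : Int) 0 := by
          rw [PySem.List.pyGetD_natCast, PySem.List.pyGetD_natCast]
          simp [List.getD]
        have ha : PySem.List.pyGetD (nm :: nt) ((k + 1 : Nat) : Int) ""
            = PySem.List.pyGetD nt (k : Int) "" := by
          rw [PySem.List.pyGetD_natCast, PySem.List.pyGetD_natCast]
          simp [List.getD]
        rw [hcast] at hb ha
        simp only [Function.comp]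
        push_cast
        rw [hb, ha]
      rw [List.filterMap_congr (fun k _ => hstep k)]
      have h' : nt.length ≤ bt.length := by simpa using h
      rw [ih bt h', List.zip_cons_cons, List.filterMap_cons]
      simp

-- the heart: A's three scans compute the second-lowest distinct grade of g (or the lowest
-- when all grades are equal), which is what B reads off sorted(set(g))
theorem second_eq (g : List Int) (hg : g ≠ []) :
    (g.filter (fun x => decide ((g.foldl min (g.getD 0 0)) < x))).foldl min
      (g.foldl (fun s x => if x ≠ g.foldl min (g.getD 0 0) then x else s) (g.getD 0 0))
    = (if 1 < (PySem.List.sorted (PySem.Set.ofList g) (fun x => x) false).length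
       then PySem.List.pyGetD (PySem.List.sorted (PySem.Set.ofList g) (fun x => x) false) 1 0
       else PySem.List.pyGetD (PySem.List.sorted (PySem.Set.ofList g) (fun x => x) false) 0 0) := by
  set a := g.getD 0 0 with ha_def
  set lo := g.foldl min a with hlo_def
  set d := PySem.List.sorted (PySem.Set.ofList g) (fun x => x) false with hd_def
  have ha_mem : a ∈ g := by
    cases g with
    | nil => exact absurd rfl hg
    | cons c t => simp [ha_def]
  have hlo_le : ∀ y ∈ g, lo ≤ y := (PySem.List.foldl_min_le g a).2
  have hlo_mem : lo ∈ g := by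
    rcases PySem.List.foldl_min_mem g a with h | h
    · rw [hlo_def, h]; exact ha_mem
    · exact h
  have hmem_d : ∀ x, x ∈ d ↔ x ∈ g := by
    intro x
    rw [hd_def, PySem.List.mem_sorted, PySem.Set.mem_ofList]
  have hpw : d.Pairwise (· < ·) := PySem.List.sorted_ofList_pairwise_lt g
  have hd_ne : d ≠ [] := by
    intro hnil
    have := (hmem_d lo).mpr hlo_mem
    rw [hnil] at this
    exact absurd this (List.not_mem_nil)
  obtain ⟨d0, dt, hd_eq⟩ := List.exists_cons_of_ne_nil hd_ne
  have hd0_lt : ∀ y ∈ dt, d0 < y := by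
    have := hpw
    rw [hd_eq] at this
    exact (List.pairwise_cons.mp this).1
  have hd0_eq_lo : d0 = lo := by
    have h1 : lo ≤ d0 := hlo_le d0 ((hmem_d d0).mp (by rw [hd_eq]; exact List.mem_cons_self))
    have h2 : lo = d0 ∨ lo ∈ dt := by
      have := (hmem_d lo).mpr hlo_mem
      rw [hd_eq] at this
      exact List.mem_cons.mp this
    rcases h2 with h | h
    · omega
    · have := hd0_lt lo h
      omega
  cases dt with
  | nil =>
    -- all grades equal lo
    have hall : ∀ x ∈ g, x = lo := by
      intro x hx
      have := (hmem_d x).mpr hx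
      rw [hd_eq] at this
      simp at this
      omega
    have hfilter : g.filter (fun x => decide (lo < x)) = [] := by
      apply List.filter_eq_nil_iff.mpr
      intro x hx
      simp [hall x hx]
    have ha_lo : a = lo := hall a ha_mem
    have hs1 : g.foldl (fun s x => if x ≠ lo then x else s) a = a := by
      rcases foldl_last_ne g lo a with ⟨h1, _⟩ | ⟨h1, h2⟩
      · exact h1
      · exact absurd (hall _ h1) h2
    rw [hfilter, List.foldl_nil, hs1, hd_eq]
    simp [ha_lo, hd0_eq_lo, PySem.List.pyGetD]
  | cons d1 dt' =>
    have hd1_mem : d1 ∈ g := (hmem_d d1).mp (by rw [hd_eq]; simp)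
    have hlo_lt_d1 : lo < d1 := by
      rw [← hd0_eq_lo]
      exact hd0_lt d1 List.mem_cons_self
    have hd1_min : ∀ x ∈ g, lo < x → d1 ≤ x := by
      intro x hx hlt
      have hxd := (hmem_d x).mpr hx
      rw [hd_eq] at hxd
      rcases List.mem_cons.mp hxd with h | h
      · omega
      rcases List.mem_cons.mp h with h | h
      · omega
      · have hpw' := hpw
        rw [hd_eq] at hpw'
        have := ((List.pairwise_cons.mp hpw').2)
        have := (List.pairwise_cons.mp this).1 x h
        omega
    set s1 := g.foldl (fun s x => if x ≠ lo then x else s) a with hs1_def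
    have hs1_facts : s1 ∈ g ∧ s1 ≠ lo := by
      rcases foldl_last_ne g lo a with ⟨_, h2⟩ | h
      · exact absurd (h2 d1 hd1_mem) (by omega)
      · exact h
    have hlo_lt_s1 : lo < s1 := by
      have := hlo_le s1 hs1_facts.1
      have := hs1_facts.2
      omega
    set F := g.filter (fun x => decide (lo < x)) with hF_def
    have hd1_F : d1 ∈ F := by
      rw [hF_def, List.mem_filter]
      exact ⟨hd1_mem, by simp [hlo_lt_d1]⟩
    set s2 := F.foldl min s1 with hs2_def
    have hs2_le_d1 : s2 ≤ d1 := (PySem.List.foldl_min_le F s1).2 d1 hd1_F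
    have hs2_cases : s2 = s1 ∨ s2 ∈ F := PySem.List.foldl_min_mem F s1
    have hd1_le_s2 : d1 ≤ s2 := by
      rcases hs2_cases with h | h
      · exact h ▸ hd1_min s1 hs1_facts.1 hlo_lt_s1
      · rw [hF_def, List.mem_filter] at h
        exact hd1_min s2 h.1 (by simpa using h.2)
    have hs2_eq : s2 = d1 := by omega
    rw [hs2_eq, hd_eq]
    simp [PySem.List.pyGetD]

-- ===== VERDICT (by name: the statement is the Claim_ definition above) =====
theorem nestedLists_spec : Claim_equal_nestedLists := by
  intro num names grades _hdom hpre
  obtain ⟨hne, hlen⟩ := hpre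
  show nestedLists num names grades = nestedLists_alt num names grades
  by_cases hn0 : names = []
  · simp [nestedLists, nestedLists_alt, hn0,
      PySem.List.pyRange_one_eq_nil (le_refl (0 : Int))]
  · have hnpos : 0 < names.length := List.length_pos_iff.mpr hn0
    simp only [nestedLists, nestedLists_alt, if_neg hn0]
    rw [PySem.List.slice_to_natCast]
    have hgne : grades.take names.length ≠ [] := by
      intro h
      have h2 : (grades.take names.length).length = names.length := List.length_take_of_le hlen
      rw [h] at h2
      simp at h2
      omega
    have hL0g : PySem.List.pyGetD grades 0 0 = (grades.take names.length).getD 0 0 := by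
      rw [PySem.List.pyGetD_zero]
      cases grades with
      | nil => exact absurd rfl hne
      | cons c t =>
        cases hn : names.length with
        | zero => omega
        | succ m => simp
    have e1 : (PySem.List.pyRange 0 (names.length : Int) 1).foldl
        (fun l i => if PySem.List.pyGetD grades i 0 < l then PySem.List.pyGetD grades i 0 else l)
        (PySem.List.pyGetD grades 0 0)
        = (grades.take names.length).foldl (fun s x => if x < s then x else s)
            (PySem.List.pyGetD grades 0 0) :=
      foldl_range_getD grades names.length hlen (fun s x => if x < s then x else s) _
    have e2 : ∀ (L : Int), (PySem.List.pyRange 0 (names.length : Int) 1).foldl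
        (fun s j => if PySem.List.pyGetD grades j 0 ≠ L then PySem.List.pyGetD grades j 0 else s)
        (PySem.List.pyGetD grades 0 0)
        = (grades.take names.length).foldl (fun s x => if x ≠ L then x else s)
            (PySem.List.pyGetD grades 0 0) :=
      fun L => foldl_range_getD grades names.length hlen (fun s x => if x ≠ L then x else s) _
    have e3 : ∀ (L S : Int), (PySem.List.pyRange 0 (names.length : Int) 1).foldl
        (fun s k => if PySem.List.pyGetD grades k 0 ≤ s ∧ PySem.List.pyGetD grades k 0 > L
                    then PySem.List.pyGetD grades k 0 else s) S
        = (grades.take names.length).foldl (fun s x => if x ≤ s ∧ x > L then x else s) S :=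
      fun L S => foldl_range_getD grades names.length hlen
        (fun s x => if x ≤ s ∧ x > L then x else s) S
    have e4 : ∀ (S : Int), (PySem.List.pyRange 0 (names.length : Int) 1).foldl
        (fun acc p => if PySem.List.pyGetD grades p 0 = S
                      then acc ++ [PySem.List.pyGetD names p ""] else acc) []
        = (names.zip grades).filterMap (fun p => if p.2 = S then some p.1 else none) := by
      intro S
      rw [foldl_ifapp_eq_filterMap _ (fun p => PySem.List.pyGetD grades p 0 = S)
            (fun p => PySem.List.pyGetD names p "") [], List.nil_append]
      rw [PySem.List.pyRange_one]
      simp only [sub_zero, Int.toNat_natCast, List.filterMap_map]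
      have hcongr : ∀ k ∈ List.range names.length,
          ((fun i => if PySem.List.pyGetD grades i 0 = S
              then some (PySem.List.pyGetD names i "") else none) ∘ (fun k : Nat => (0 : Int) + k)) k
          = (fun k : Nat => if PySem.List.pyGetD grades (k : Int) 0 = S
              then some (PySem.List.pyGetD names (k : Int) "") else none) k := by
        intro k _
        simp [Function.comp]
      rw [List.filterMap_congr hcongr]
      exact filterMap_range_zip S names grades hlen
    rw [e1, foldl_if_lt_eq_min, e2, e3, e4, hL0g]
    rw [foldl_between (grades.take names.length) _ _
          (PySem.List.foldl_min_le (grades.take names.length) ((grades.take names.length).getD 0 0)).2]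
    rw [second_eq (grades.take names.length) hgne]
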